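-- pv_equiv track=rewrite | github.com/Pav0l/cracking-the-coding-interview | HackerRank/array_manipulation.py | arr_manip_optimized
-- ===== SOURCE A (Python) =====
-- def arr_manip_optimized(n, queries):
--     m = len(queries)
--     arr = [0] * (n+1)
--
--     for i in range(m):
--         start = queries[i][0] - 1
--         end = queries[i][1]
--         k = queries[i][2]
--
--         arr[start] += k
--         arr[end] -= k
--
--     maxv = 0
--     count = 0
--
--     for i in arr:
--         count += i
--         if count > maxv:
--             maxv = count
--
--     return maxv
-- ===== SOURCE B (Python) =====
-- def _best(arr):
--     # (total, best) for a non-empty list: total = sum(arr), best = max over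
--     # non-empty prefixes of their sum, combined divide-and-conquer style
--     if len(arr) == 1:
--         return arr[0], arr[0]
--     mid = len(arr) // 2
--     t1, b1 = _best(arr[:mid])
--     t2, b2 = _best(arr[mid:])
--     return t1 + t2, max(b1, t1 + b2)
--
--
-- def arr_manip_optimized(n, queries):
--     arr = [0] * (n + 1)
--     for q in queries:
--         arr[q[0] - 1] += q[2]
--         arr[q[1]] -= q[2]
--     if not arr:
--         return 0
--     return max(0, _best(arr)[1])
-- ===== Notes on version B (the rewrite author's own statement) =====
-- stated objective: alternative
-- what changed: B keeps the difference array but computes the answer by a recursive divide-and-conquer combine of (segment total, best non-empty prefix sum) pairs over halves of the array, instead of A's index-by-index running accumulator with an in-loop maximum.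
import Mathlib
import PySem

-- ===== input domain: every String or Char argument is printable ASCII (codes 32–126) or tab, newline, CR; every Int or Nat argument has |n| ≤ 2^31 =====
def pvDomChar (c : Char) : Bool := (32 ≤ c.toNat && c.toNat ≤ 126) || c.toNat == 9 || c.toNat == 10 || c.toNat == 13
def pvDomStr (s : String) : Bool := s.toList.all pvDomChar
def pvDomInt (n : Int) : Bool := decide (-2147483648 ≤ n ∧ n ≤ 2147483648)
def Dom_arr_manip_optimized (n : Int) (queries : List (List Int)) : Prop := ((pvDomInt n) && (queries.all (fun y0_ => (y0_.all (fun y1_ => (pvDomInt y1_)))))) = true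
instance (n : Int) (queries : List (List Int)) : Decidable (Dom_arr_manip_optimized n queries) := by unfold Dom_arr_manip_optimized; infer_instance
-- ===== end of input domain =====

-- B keeps A's difference array but computes the maximum prefix sum by a recursive
-- divide-and-conquer combine of (total, best-prefix) pairs instead of A's index-by-index
-- running accumulator; an alternative decomposition of the same cost.
set_option maxRecDepth 4096


-- ===== PORT A =====
def arr_manip_optimized (n : Int) (queries : List (List Int)) : Int :=
  let m : Int := (queries.length : Int)
  let arr : List Int := PySem.List.pyRepeat [0] (n + 1)
  let arr := (PySem.List.pyRange 0 m 1).foldl (fun arr i =>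
      let q := PySem.List.pyGetD queries i []
      let start := PySem.List.pyGetD q 0 0 - 1
      let endv := PySem.List.pyGetD q 1 0
      let k := PySem.List.pyGetD q 2 0
      let arr := PySem.List.pySetD arr start (PySem.List.pyGetD arr start 0 + k)
      PySem.List.pySetD arr endv (PySem.List.pyGetD arr endv 0 - k)) arr
  let r := arr.foldl (fun (p : Int × Int) i =>
      let count := p.1 + i
      (count, if count > p.2 then count else p.2)) ((0 : Int), (0 : Int))
  r.2

-- ===== PORT B =====
-- Source B's _best: (total, best non-empty prefix sum) of a non-empty list, divide and conquer.
-- The Python tests 'len(arr) == 1'; the guard here is 'length ≤ 1' only so the recursion is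
-- total on [] (Source B never calls _best on an empty list: it is behind the 'if not arr' test);
-- the slices arr[:mid], arr[mid:] with 0 ≤ mid ≤ len(arr) are exactly take/drop.
def pvBest (arr : List Int) : Int × Int :=
  if _h : arr.length ≤ 1 then (PySem.List.pyGetD arr 0 0, PySem.List.pyGetD arr 0 0)
  else
    let mid : Nat := arr.length / 2
    let p1 := pvBest (arr.take mid)
    let p2 := pvBest (arr.drop mid)
    (p1.1 + p2.1, max p1.2 (p1.1 + p2.2))
termination_by arr.length
decreasing_by
  · simp only [List.length_take]; omega
  · simp only [List.length_drop]; omega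

def arr_manip_optimized_alt (n : Int) (queries : List (List Int)) : Int :=
  let arr : List Int := PySem.List.pyRepeat [0] (n + 1)
  let arr := queries.foldl (fun arr q =>
      let arr := PySem.List.pySetD arr (PySem.List.pyGetD q 0 0 - 1)
          (PySem.List.pyGetD arr (PySem.List.pyGetD q 0 0 - 1) 0 + PySem.List.pyGetD q 2 0)
      PySem.List.pySetD arr (PySem.List.pyGetD q 1 0)
          (PySem.List.pyGetD arr (PySem.List.pyGetD q 1 0) 0 - PySem.List.pyGetD q 2 0)) arr
  if arr.isEmpty then 0
  else max 0 (pvBest arr).2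

-- ===== PRECONDITION & SPEC =====
-- Pre_ is exactly the domain on which A returns: every query has at least three entries and both
-- Python list indices (q[0]-1 and q[1]) are in the valid index range [-(n+1), n] of the
-- (n+1)-cell array; outside it A raises an IndexError.
def Pre_arr_manip_optimized (n : Int) (queries : List (List Int)) : Prop :=
  ∀ q ∈ queries, 3 ≤ q.length ∧ -(n+1) ≤ q.getD 0 0 - 1 ∧ q.getD 0 0 - 1 ≤ n ∧ -(n+1) ≤ q.getD 1 0 ∧ q.getD 1 0 ≤ n
instance (n : Int) (queries : List (List Int)) : Decidable (Pre_arr_manip_optimized n queries) := by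
  unfold Pre_arr_manip_optimized; infer_instance
def pvWitness_arr_manip_optimized : Int × List (List Int) := (3, [[1, 2, 5], [2, 3, 1]])

def Spec_arr_manip_optimized (n : Int) (queries : List (List Int)) (out : Int) : Prop := out = arr_manip_optimized_alt n queries
instance (n : Int) (queries : List (List Int)) (out : Int) : Decidable (Spec_arr_manip_optimized n queries out) := by unfold Spec_arr_manip_optimized; infer_instance

-- ===== CLAIM (what is proved, stated in full; the proofs are below) =====
def Claim_equal_arr_manip_optimized : Prop := ∀ (n : Int) (queries : List (List Int)), Dom_arr_manip_optimized n queries → Pre_arr_manip_optimized n queries → Spec_arr_manip_optimized n queries (arr_manip_optimized n queries)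

-- ===== LEMMAS AND PROOFS =====

-- the shared per-query difference-array update (both ports perform exactly these two writes)
def pvStep (arr : List Int) (q : List Int) : List Int :=
  PySem.List.pySetD (PySem.List.pySetD arr (PySem.List.pyGetD q 0 0 - 1) (PySem.List.pyGetD arr (PySem.List.pyGetD q 0 0 - 1) 0 + PySem.List.pyGetD q 2 0)) (PySem.List.pyGetD q 1 0)
    (PySem.List.pyGetD (PySem.List.pySetD arr (PySem.List.pyGetD q 0 0 - 1) (PySem.List.pyGetD arr (PySem.List.pyGetD q 0 0 - 1) 0 + PySem.List.pyGetD q 2 0)) (PySem.List.pyGetD q 1 0) 0 - PySem.List.pyGetD q 2 0)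

def pvScan (l : List Int) (c m : Int) : Int :=
  (l.foldl (fun (p : Int × Int) i => (p.1 + i, if p.1 + i > p.2 then p.1 + i else p.2)) (c, m)).2

theorem pvScan_spec (l : List Int) : ∀ c m : Int,
    m ≤ pvScan l c m ∧
    (∀ t : Nat, 1 ≤ t → t ≤ l.length → c + (l.take t).sum ≤ pvScan l c m) ∧
    (pvScan l c m = m ∨ ∃ t : Nat, 1 ≤ t ∧ t ≤ l.length ∧ pvScan l c m = c + (l.take t).sum) := by
  induction l with
  | nil =>
    intro c m
    refine ⟨le_refl _, ?_, Or.inl rfl⟩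
    intro t h1 h2; simp at h2; omega
  | cons x l ih =>
    intro c m
    have hstep : pvScan (x :: l) c m = pvScan l (c + x) (if c + x > m then c + x else m) := rfl
    obtain ⟨ih1, ih2, ih3⟩ := ih (c + x) (if c + x > m then c + x else m)
    refine ⟨?_, ?_, ?_⟩
    · rw [hstep]; exact le_trans (by split <;> omega) ih1
    · intro t h1 h2
      rw [hstep]
      match t with
      | 1 => simpa using le_trans (by split <;> omega) ih1
      | (s+2) =>
        have hs := ih2 (s+1) (by omega) (by simpa using h2)
        simpa [add_assoc] using hs
    · rw [hstep]
      by_cases hc : c + x > m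
      · simp only [if_pos hc] at ih3 ⊢
        rcases ih3 with h | ⟨t, ht1, ht2, ht3⟩
        · exact Or.inr ⟨1, by omega, by simp, by simpa using h⟩
        · exact Or.inr ⟨t+1, by omega, by simpa using ht2, by simpa [add_assoc] using ht3⟩
      · simp only [if_neg hc] at ih3 ⊢
        rcases ih3 with h | ⟨t, ht1, ht2, ht3⟩
        · exact Or.inl h
        · exact Or.inr ⟨t+1, by omega, by simpa using ht2, by simpa [add_assoc] using ht3⟩

theorem portA_eq (n : Int) (qs : List (List Int)) :
    arr_manip_optimized n qs = pvScan (qs.foldl pvStep (PySem.List.pyRepeat [0] (n + 1))) 0 0 := by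
  have h := PySem.List.foldl_pyRange_zero_pyGetD' qs ([] : List Int) pvStep
      (PySem.List.pyRepeat [0] (n + 1))
  calc arr_manip_optimized n qs
      = pvScan ((PySem.List.pyRange 0 (qs.length : Int) 1).foldl
          (fun acc j => pvStep acc (PySem.List.pyGetD qs j []))
          (PySem.List.pyRepeat [0] (n + 1))) 0 0 := rfl
    _ = pvScan (qs.foldl pvStep (PySem.List.pyRepeat [0] (n + 1))) 0 0 := by rw [h]

theorem portB_eq (n : Int) (qs : List (List Int)) :
    arr_manip_optimized_alt n qs =
      (let arr := qs.foldl pvStep (PySem.List.pyRepeat [0] (n + 1));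
       if arr.isEmpty then 0 else max 0 (pvBest arr).2) := rfl

-- the divide-and-conquer pair: total is the sum, best is sandwiched by the non-empty prefix sums
theorem pvBest_spec : ∀ (N : Nat) (l : List Int), l.length ≤ N → l ≠ [] →
    (pvBest l).1 = l.sum ∧
    (∀ t : Nat, 1 ≤ t → t ≤ l.length → (l.take t).sum ≤ (pvBest l).2) ∧
    (∃ t : Nat, 1 ≤ t ∧ t ≤ l.length ∧ (pvBest l).2 = (l.take t).sum) := by
  intro N
  induction N with
  | zero =>
    intro l hN hne
    cases l with
    | nil => exact absurd rfl hne
    | cons a l => simp at hN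
  | succ N ih =>
    intro l hN hne
    by_cases h1 : l.length ≤ 1
    · have hlen : l.length = 1 := by
        cases l with
        | nil => exact absurd rfl hne
        | cons a t => simp at h1 ⊢; omega
      obtain ⟨a, rfl⟩ := List.length_eq_one_iff.mp hlen
      rw [pvBest]
      simp [PySem.List.pyGetD, PySem.List.pyGet?, PySem.List.pyIdx?]
      exact ⟨fun t h1 h2 => by interval_cases t <;> simp, 1, by omega, by simp⟩
    · push_neg at h1
      set mid : Nat := l.length / 2 with hmid
      have hm1 : 1 ≤ mid := by omega
      have hm2 : mid < l.length := by omega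
      have hl1len : (l.take mid).length = mid := by simp; omega
      have hl2len : (l.drop mid).length = l.length - mid := by simp
      have hne1 : l.take mid ≠ [] := by
        intro h; rw [← List.length_eq_zero_iff] at h; omega
      have hne2 : l.drop mid ≠ [] := by
        intro h; rw [← List.length_eq_zero_iff] at h; omega
      obtain ⟨s1, u1, t1, ht11, ht12, ht13⟩ := ih (l.take mid) (by omega) hne1
      obtain ⟨s2, u2, t2, ht21, ht22, ht23⟩ := ih (l.drop mid) (by omega) hne2
      have hstep : pvBest l = ((pvBest (l.take mid)).1 + (pvBest (l.drop mid)).1,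
          max (pvBest (l.take mid)).2 ((pvBest (l.take mid)).1 + (pvBest (l.drop mid)).2)) := by
        rw [pvBest, dif_neg (by omega : ¬ l.length ≤ 1)]
      have hsum : l.sum = (l.take mid).sum + (l.drop mid).sum := by
        conv_lhs => rw [← List.take_append_drop mid l]
        rw [List.sum_append]
      refine ⟨by rw [hstep, s1, s2, hsum], ?_, ?_⟩
      · intro t hta htb
        rw [hstep]
        by_cases htm : t ≤ mid
        · have he : l.take t = (l.take mid).take t := by
            rw [List.take_take, min_eq_left htm]
          rw [he]
          exact le_trans (u1 t hta (by omega)) (le_max_left _ _)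
        · have he : l.take t = l.take mid ++ (l.drop mid).take (t - mid) := by
            conv_lhs => rw [show t = mid + (t - mid) by omega]
            exact List.take_add
          rw [he, List.sum_append, s1]
          have := u2 (t - mid) (by omega) (by omega)
          have hmax := le_max_right ((pvBest (l.take mid)).2) ((pvBest (l.take mid)).1 + (pvBest (l.drop mid)).2)
          omega
      · rw [hstep]
        rcases max_choice ((pvBest (l.take mid)).2) ((pvBest (l.take mid)).1 + (pvBest (l.drop mid)).2) with h | h
        · refine ⟨t1, ht11, by omega, ?_⟩
          rw [h, ht13, List.take_take, min_eq_left (by omega : t1 ≤ mid)]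
        · refine ⟨mid + t2, by omega, by omega, ?_⟩
          rw [h, s1, ht23]
          have he : l.take (mid + t2) = l.take mid ++ (l.drop mid).take t2 :=
            List.take_add
          rw [he, List.sum_append]

theorem main_eq (n : Int) (qs : List (List Int)) :
    arr_manip_optimized n qs = arr_manip_optimized_alt n qs := by
  rw [portA_eq, portB_eq]
  set arr := qs.foldl pvStep (PySem.List.pyRepeat [0] (n + 1)) with harr
  by_cases h : arr.isEmpty
  · rw [List.isEmpty_iff] at h
    rw [h]
    simp only [List.isEmpty_nil, if_pos]
    rfl
  · have hne : arr ≠ [] := by simpa [List.isEmpty_iff] using h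
    simp only [h, Bool.false_eq_true, if_false]
    obtain ⟨-, hub, t0, ht0a, ht0b, hatt⟩ := pvBest_spec arr.length arr (le_refl _) hne
    obtain ⟨s1, s2, s3⟩ := pvScan_spec arr 0 0
    apply le_antisymm
    · rcases s3 with hz | ⟨t, hta, htb, hte⟩
      · rw [hz]; exact le_max_left _ _
      · rw [hte, zero_add]
        exact le_trans (hub t hta htb) (le_max_right _ _)
    · apply max_le s1
      rw [hatt]
      have := s2 t0 ht0a ht0b
      omega

-- ===== VERDICT (by name: the statement is the Claim_ definition above) =====
theorem arr_manip_optimized_spec : Claim_equal_arr_manip_optimized := by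
  intro n queries _ _
  unfold Spec_arr_manip_optimized
  exact main_eq n queries
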